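-- pv_equiv track=rewrite | github.com/KanekiiKat/Tareas_de_programacion | Find character.py | find_characters
-- ===== SOURCE A (Python) =====
-- def find_characters(matrix):
--     lista = list(matrix.replace("\n", ""))
--     cuenta = []
--     posicion = []
--     for char in lista:
--         cuenta.append(lista.count(char))
--     for pos, num in enumerate(cuenta):
--         if num == min(cuenta) and lista[pos] not in posicion:
--             posicion.append(lista[pos])
--     letras = [char for char in posicion if char.isalpha()]
--     numeros = [char for char in posicion if char.isdigit()]
--     posicion = sorted(letras) + sorted(numeros)
--     resultado = "".join(posicion)
--     return resultado
-- ===== SOURCE B (Python) =====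
-- def find_characters(matrix):
--     s = sorted(matrix.replace("\n", ""))
--     if not s:
--         return ""
--     runs = []
--     cur = s[0]
--     cnt = 1
--     for c in s[1:]:
--         if c == cur:
--             cnt += 1
--         else:
--             runs.append((cur, cnt))
--             cur, cnt = c, 1
--     runs.append((cur, cnt))
--     m = min(n for _, n in runs)
--     keep = [c for c, n in runs if n == m]
--     letters = [c for c in keep if c.isalpha()]
--     digits = [c for c in keep if c.isdigit()]
--     return "".join(letters + digits)
-- ===== Notes on version B (the rewrite author's own statement) =====
-- stated objective: faster
-- what changed: B sorts the newline-stripped characters once and run-length-encodes the sorted list in a single scan (sort-then-group), reading the minimum run length off the runs; A's per-character lista.count scans, the min recomputed inside the loop, the membership test and the two final sorts all disappear (B's kept runs are already in sorted order).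
import Mathlib
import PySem

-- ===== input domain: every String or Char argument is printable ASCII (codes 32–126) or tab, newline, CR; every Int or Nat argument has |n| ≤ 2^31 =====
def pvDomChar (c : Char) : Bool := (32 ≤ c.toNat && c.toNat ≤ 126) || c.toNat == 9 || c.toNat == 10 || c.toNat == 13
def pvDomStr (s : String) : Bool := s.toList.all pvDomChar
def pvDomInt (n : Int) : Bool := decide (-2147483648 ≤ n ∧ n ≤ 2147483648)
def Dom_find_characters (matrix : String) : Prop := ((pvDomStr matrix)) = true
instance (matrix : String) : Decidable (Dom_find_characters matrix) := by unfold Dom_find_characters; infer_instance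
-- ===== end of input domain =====

-- B sorts the newline-stripped characters once and run-length-encodes the sorted list in one
-- scan; A's per-character count scans, membership test and final sorts are gone. Same value.

-- ===== PORT A =====
-- cuenta.append(lista.count(char)) for each char
def pvA_cuenta (lista : List Char) : List Int :=
  lista.foldl (fun acc c => acc ++ [(PySem.List.count lista c : Int)]) []

-- for pos, num in enumerate(cuenta): if num == min(cuenta) and lista[pos] not in posicion: append
def pvA_loop (lista : List Char) (cuenta : List Int) : List Char :=
  (PySem.List.enumerate cuenta 0).foldl (fun acc p =>
    match PySem.List.pyGet? lista p.1 with
    | some c => if some p.2 = PySem.List.min? cuenta (fun x => x) ∧ c ∉ acc then acc ++ [c] else acc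
    | none => acc) []

def pvA_core (lista : List Char) : String :=
  let cuenta := pvA_cuenta lista
  let posicion := pvA_loop lista cuenta
  let letras := posicion.filter (fun c => PySem.Chars.isalpha c)
  let numeros := posicion.filter (fun c => PySem.Chars.isdigit c)
  String.ofList (PySem.List.sorted letras (fun x => x) false ++ PySem.List.sorted numeros (fun x => x) false)

def find_characters (matrix : String) : String :=
  pvA_core ((PySem.Str.replace matrix "\n" "").toList)

-- ===== PORT B =====
-- loop body over the sorted chars: if c == cur: cnt += 1 else: runs.append((cur, cnt)); cur, cnt = c, 1
def pvB_step (st : List (Char × Int) × Char × Int) (c : Char) : List (Char × Int) × Char × Int :=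
  if c = st.2.1 then (st.1, st.2.1, st.2.2 + 1) else (st.1 ++ [(st.2.1, st.2.2)], c, 1)

def pvB_core (s : List Char) : String :=
  match s with
  | [] => ""                       -- if not s: return ""
  | c0 :: t =>                     -- cur, cnt = s[0], 1; loop over s[1:]
    let st := t.foldl pvB_step ([], c0, 1)
    let runs := st.1 ++ [st.2]     -- runs.append((cur, cnt))
    match PySem.List.min? (runs.map (fun p => p.2)) (fun x => x) with
    | none => ""                   -- unreachable: runs ends with the final append
    | some m =>
      let keep := (runs.filter (fun p => p.2 == m)).map (fun p => p.1)
      String.ofList (keep.filter (fun c => PySem.Chars.isalpha c)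
                  ++ keep.filter (fun c => PySem.Chars.isdigit c))

def find_characters_alt (matrix : String) : String :=
  pvB_core (PySem.List.sorted ((PySem.Str.replace matrix "\n" "").toList) (fun x => x) false)

-- ===== PRECONDITION & SPEC =====
def Spec_find_characters (matrix : String) (out : String) : Prop := out = find_characters_alt matrix
instance (matrix : String) (out : String) : Decidable (Spec_find_characters matrix out) := by unfold Spec_find_characters; infer_instance

-- ===== CLAIM (what is proved, stated in full; the proofs are below) =====
def Claim_equal_find_characters : Prop := ∀ (matrix : String), Dom_find_characters matrix → Spec_find_characters matrix (find_characters matrix)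

-- ===== LEMMAS AND PROOFS =====

-- frequency of c in l, as Python's int
def pvCnt (l : List Char) (c : Char) : Int := (PySem.List.count l c : Int)

-- the A-loop body once the index lookup has been resolved
def pvStep (mv : Option Int) (l : List Char) (acc : List Char) (c : Char) : List Char :=
  if some (pvCnt l c) = mv ∧ c ∉ acc then acc ++ [c] else acc

theorem pvA_loop_eq_foldl (l : List Char) :
    ∀ (suf pre acc : List Char), pre ++ suf = l →
    (PySem.List.enumerate (suf.map (pvCnt l)) ((pre.length : Nat) : Int)).foldl (fun acc p =>
      match PySem.List.pyGet? l p.1 with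
      | some c => if some p.2 = PySem.List.min? (l.map (pvCnt l)) (fun x => x) ∧ c ∉ acc then acc ++ [c] else acc
      | none => acc) acc
    = suf.foldl (pvStep (PySem.List.min? (l.map (pvCnt l)) (fun x => x)) l) acc := by
  intro suf
  induction suf with
  | nil =>
    intro pre acc h
    simp
  | cons c t ih =>
    intro pre acc h
    rw [List.map_cons, PySem.List.enumerate_cons, List.foldl_cons, List.foldl_cons]
    have hlen : pre.length < l.length := by subst h; simp
    have hget : PySem.List.pyGet? l ((pre.length : Nat) : Int) = some c := by
      rw [PySem.List.pyGet?_natCast, List.getElem?_eq_getElem hlen]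
      congr 1
      subst h
      rw [List.getElem_append_right (le_refl pre.length)]
      simp
    simp only [hget, pvStep]
    have hcast : ((pre.length : Nat) : Int) + 1 = (((pre ++ [c]).length : Nat) : Int) := by
      simp
    rw [hcast]
    exact ih (pre ++ [c]) _ (by rw [List.append_assoc]; simpa using h)

theorem pv_mem_foldl (mv : Option Int) (l : List Char) :
    ∀ (suf acc : List Char) (x : Char),
    x ∈ suf.foldl (pvStep mv l) acc ↔ x ∈ acc ∨ (x ∈ suf ∧ some (pvCnt l x) = mv) := by
  intro suf
  induction suf with
  | nil => intro acc x; simp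
  | cons c t ih =>
    intro acc x
    rw [List.foldl_cons, ih]
    unfold pvStep
    by_cases hx : x = c
    · subst hx
      split_ifs with hif
      · simp only [List.mem_append, List.mem_cons]
        have := hif.1
        tauto
      · simp only [List.mem_cons]
        rw [Classical.not_and_iff_not_or_not, not_not] at hif
        tauto
    · split_ifs with hif
      · simp only [List.mem_append, List.mem_cons]
        tauto
      · simp only [List.mem_cons]
        tauto

theorem pv_nodup_foldl (mv : Option Int) (l : List Char) :
    ∀ (suf acc : List Char), acc.Nodup → (suf.foldl (pvStep mv l) acc).Nodup := by
  intro suf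
  induction suf with
  | nil => intro acc h; simpa using h
  | cons c t ih =>
    intro acc h
    rw [List.foldl_cons]
    apply ih
    unfold pvStep
    split_ifs with hif
    · simp [List.nodup_append, h]
      exact fun a ha hac => hif.2 (hac ▸ ha)
    · exact h

-- ===== B-side: run-length encoding of a sorted list =====

def pvRleFrom (cur : Char) (cnt : Int) : List Char → List (Char × Int)
  | [] => [(cur, cnt)]
  | c :: t => if c = cur then pvRleFrom cur (cnt + 1) t else (cur, cnt) :: pvRleFrom c 1 t

def pvSpecRLE : List Char → List (Char × Int)
  | [] => []
  | c :: t => (c, 1 + pvCnt t c) :: pvSpecRLE (t.filter (fun x => x ≠ c))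
termination_by l => l.length
decreasing_by simp only [List.length_unattach]; exact Nat.lt_succ_of_le (le_trans (List.length_filter_le _ _) (le_of_eq t.length_attach))

theorem pvFilterAux (t : List Char) (c : Char) :
    (List.filter (fun x : {x // x ∈ t} => match x with | ⟨x, _⟩ => decide (x ≠ c)) t.attach).unattach
      = t.filter (fun x => x ≠ c) := by
  rw [List.unattach_filter (g := fun x => decide (x ≠ c)) (hf := fun x h => rfl), List.unattach_attach]

theorem pvSpecRLE_cons (c : Char) (t : List Char) :
    pvSpecRLE (c :: t) = (c, 1 + pvCnt t c) :: pvSpecRLE (t.filter (fun x => x ≠ c)) := by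
  rw [pvSpecRLE]

theorem pvB_foldl_rle (t : List Char) :
    ∀ (acc : List (Char × Int)) (cur : Char) (cnt : Int),
    (t.foldl pvB_step (acc, cur, cnt)).1 ++ [(t.foldl pvB_step (acc, cur, cnt)).2]
      = acc ++ pvRleFrom cur cnt t := by
  induction t with
  | nil => intro acc cur cnt; simp [pvRleFrom]
  | cons c t ih =>
    intro acc cur cnt
    rw [List.foldl_cons]
    have hstep : pvB_step (acc, cur, cnt) c
        = if c = cur then (acc, cur, cnt + 1) else (acc ++ [(cur, cnt)], c, 1) := by
      simp only [pvB_step]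
    rw [hstep]
    by_cases h : c = cur
    · rw [if_pos h, ih acc cur (cnt + 1), pvRleFrom, if_pos h]
    · rw [if_neg h, ih (acc ++ [(cur, cnt)]) c 1, pvRleFrom, if_neg h]
      simp

theorem pvRleFrom_sorted (t : List Char) :
    ∀ (cur : Char) (cnt : Int), (cur :: t).Pairwise (· ≤ ·) →
    pvRleFrom cur cnt t = (cur, cnt + pvCnt t cur) :: pvSpecRLE (t.filter (fun x => x ≠ cur)) := by
  induction t with
  | nil => intro cur cnt _; simp [pvRleFrom, pvSpecRLE, pvCnt]
  | cons c t ih =>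
    intro cur cnt hp
    rw [List.pairwise_cons] at hp
    obtain ⟨hcur, hct⟩ := hp
    rw [List.pairwise_cons] at hct
    rw [pvRleFrom]
    by_cases h : c = cur
    · rw [if_pos h]
      subst h
      rw [ih c (cnt + 1) (List.pairwise_cons.mpr ⟨hct.1, hct.2⟩)]
      have h1 : pvCnt (c :: t) c = pvCnt t c + 1 := by
        simp [pvCnt, PySem.List.count_eq]
      have h2 : (c :: t).filter (fun x => x ≠ c) = t.filter (fun x => x ≠ c) := by simp
      rw [h1, h2]
      congr 2
      ring
    · rw [if_neg h]
      have hlt : cur < c := lt_of_le_of_ne (hcur c (by simp)) (fun e => h e.symm)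
      have hnotmem : cur ∉ c :: t := by
        intro hm
        rcases List.mem_cons.mp hm with e | hm'
        · exact absurd e.symm h
        · exact absurd (lt_of_lt_of_le hlt (hct.1 cur hm')) (lt_irrefl cur)
      have hcnt0 : pvCnt (c :: t) cur = 0 := by
        simp [pvCnt, PySem.List.count_eq, List.count_eq_zero.mpr hnotmem]
      have hfe : (c :: t).filter (fun x => x ≠ cur) = c :: t := by
        rw [List.filter_eq_self]
        intro x hx
        simp only [ne_eq, decide_eq_true_eq]
        intro e
        exact hnotmem (e ▸ hx)
      rw [ih c 1 (List.pairwise_cons.mpr ⟨hct.1, hct.2⟩), hcnt0, hfe, pvSpecRLE_cons]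
      simp [pvCnt]

theorem pv_mem_specRLE : ∀ (t : List Char) (p : Char × Int),
    p ∈ pvSpecRLE t ↔ p.1 ∈ t ∧ p.2 = pvCnt t p.1 := by
  intro t
  induction t using pvSpecRLE.induct with
  | case1 => intro p; simp [pvSpecRLE]
  | case2 c t ih =>
    simp only [pvFilterAux] at ih
    intro p
    rw [pvSpecRLE_cons, List.mem_cons, ih p]
    constructor
    · rintro (rfl | ⟨h1, h2⟩)
      · refine ⟨by simp, ?_⟩
        simp [pvCnt, PySem.List.count_eq]
        ring
      · rw [List.mem_filter] at h1
        have hne : p.1 ≠ c := by simpa using h1.2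
        refine ⟨List.mem_cons_of_mem _ h1.1, ?_⟩
        rw [h2]
        simp [pvCnt, PySem.List.count_eq]
        rw [List.count_filter (by simpa using hne), List.count_cons]
        have hb : (c == p.1) = false := by simpa using fun e : c = p.1 => hne e.symm
        simp [hb]
    · rintro ⟨h1, h2⟩
      by_cases he : p.1 = c
      · left
        have h3 : p.2 = 1 + pvCnt t c := by
          rw [h2, he]
          simp [pvCnt, PySem.List.count_eq]
          ring
        calc p = (p.1, p.2) := rfl
          _ = (c, 1 + pvCnt t c) := by rw [he, h3]
      · right
        have hmem : p.1 ∈ t := by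
          rcases List.mem_cons.mp h1 with e | h
          · exact absurd e he
          · exact h
        refine ⟨List.mem_filter.mpr ⟨hmem, by simpa using he⟩, ?_⟩
        rw [h2]
        simp [pvCnt, PySem.List.count_eq]
        rw [List.count_filter (by simpa using he), List.count_cons]
        have hb : (c == p.1) = false := by simpa using fun e : c = p.1 => he e.symm
        simp [hb]

theorem pv_pairwise_fst_specRLE : ∀ (t : List Char), t.Pairwise (· ≤ ·) →
    ((pvSpecRLE t).map (fun p => p.1)).Pairwise (· < ·) := by
  intro t
  induction t using pvSpecRLE.induct with
  | case1 => intro _; simp [pvSpecRLE]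
  | case2 c t ih =>
    simp only [pvFilterAux] at ih
    intro hp
    rw [List.pairwise_cons] at hp
    rw [pvSpecRLE_cons, List.map_cons, List.pairwise_cons]
    constructor
    · intro x hx
      rw [List.mem_map] at hx
      obtain ⟨q, hq, rfl⟩ := hx
      have h := ((pv_mem_specRLE _ q).mp hq).1
      rw [List.mem_filter] at h
      have hne : q.1 ≠ c := by simpa using h.2
      exact lt_of_le_of_ne (hp.1 q.1 h.1) (fun e => hne e.symm)
    · exact ih (hp.2.filter _)

-- B's kept characters (those of minimal multiplicity), in sorted order
theorem pv_core_eq (l : List Char) :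
    pvA_core l = pvB_core (PySem.List.sorted l (fun x => x) false) := by
  by_cases hl : l = []
  · subst hl; decide
  · -- notation
    set t := PySem.List.sorted l (fun x => x) false with ht
    have hperm : t.Perm l := PySem.List.sorted_perm l _ _
    have htne : t ≠ [] := by
      intro h; exact hl (by simpa [h] using (PySem.List.sorted_eq_nil_iff (xs := l) (key := fun x => x) (rev := false)).mp (ht ▸ h))
    obtain ⟨c0, t', ht'⟩ := List.exists_cons_of_ne_nil htne
    have hsortedp : t.Pairwise (· ≤ ·) := by
      simpa using PySem.List.sorted_pairwise l (fun x => x)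
    -- counts agree between t and l
    have hcnt : ∀ c, pvCnt t c = pvCnt l c := by
      intro c; simp [pvCnt, PySem.List.count_eq, hperm.count_eq]
    -- B's runs are pvSpecRLE t
    have hruns : (t'.foldl pvB_step ([], c0, 1)).1 ++ [(t'.foldl pvB_step ([], c0, 1)).2]
        = pvSpecRLE t := by
      rw [pvB_foldl_rle, List.nil_append,
        pvRleFrom_sorted t' c0 1 (ht' ▸ hsortedp)]
      rw [ht', pvSpecRLE_cons]
    -- A's minimum
    have hcuenta : pvA_cuenta l = l.map (pvCnt l) := by
      unfold pvA_cuenta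
      rw [PySem.List.foldl_append_singleton_eq_map]
      simp [pvCnt]
    have hAne : l.map (pvCnt l) ≠ [] := by simpa using hl
    obtain ⟨mA, hmA⟩ : ∃ m, PySem.List.min? (l.map (pvCnt l)) (fun x => x) = some m := by
      cases h : PySem.List.min? (l.map (pvCnt l)) (fun x => x) with
      | none => exact absurd ((PySem.List.min?_eq_none_iff _ _).mp h) hAne
      | some m => exact ⟨m, rfl⟩
    -- B's minimum
    have hBne : (pvSpecRLE t).map (fun p => p.2) ≠ [] := by
      rw [← hruns]; simp
    obtain ⟨mB, hmB⟩ : ∃ m, PySem.List.min? ((pvSpecRLE t).map (fun p => p.2)) (fun x => x) = some m := by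
      cases h : PySem.List.min? ((pvSpecRLE t).map (fun p => p.2)) (fun x => x) with
      | none => exact absurd ((PySem.List.min?_eq_none_iff _ _).mp h) hBne
      | some m => exact ⟨m, rfl⟩
    have hAB : mA = mB := by
      have h1 := PySem.List.min?_mem hmA
      have h2 := PySem.List.min?_isMin hmA
      have h3 := PySem.List.min?_mem hmB
      have h4 := PySem.List.min?_isMin hmB
      apply le_antisymm
      · obtain ⟨q, hq, rfl⟩ := List.mem_map.mp h3
        obtain ⟨hq1, hq2⟩ := (pv_mem_specRLE t q).mp hq
        rw [hq2, hcnt]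
        exact h2 _ (List.mem_map_of_mem (hperm.mem_iff.mp hq1))
      · obtain ⟨c, hc, rfl⟩ := List.mem_map.mp h1
        have hmem : (c, pvCnt t c) ∈ pvSpecRLE t :=
          (pv_mem_specRLE t (c, pvCnt t c)).mpr ⟨hperm.mem_iff.mpr hc, rfl⟩
        have := h4 _ (List.mem_map_of_mem hmem)
        simpa [hcnt] using this
    subst hAB
    -- A's posicion
    have hloop : pvA_loop l (pvA_cuenta l) = l.foldl (pvStep (some mA) l) [] := by
      unfold pvA_loop
      simp only [hcuenta, hmA]
      have h := pvA_loop_eq_foldl l l [] [] (by simp)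
      simp only [hmA, List.length_nil, Nat.cast_zero] at h
      exact h
    -- B's keep
    set keep := (((pvSpecRLE t).filter (fun p => p.2 == mA)).map (fun p => p.1)) with hkeep
    have hmemkeep : ∀ x, x ∈ keep ↔ x ∈ l ∧ pvCnt l x = mA := by
      intro x
      rw [hkeep, List.mem_map]
      constructor
      · rintro ⟨q, hq, rfl⟩
        rw [List.mem_filter] at hq
        obtain ⟨h1, h2⟩ := (pv_mem_specRLE t q).mp hq.1
        refine ⟨hperm.mem_iff.mp h1, ?_⟩
        rw [← hcnt, ← h2]
        exact (beq_iff_eq.mp hq.2)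
      · rintro ⟨h1, h2⟩
        refine ⟨(x, pvCnt t x), List.mem_filter.mpr ⟨?_, ?_⟩, rfl⟩
        · exact (pv_mem_specRLE t _).mpr ⟨hperm.mem_iff.mpr h1, rfl⟩
        · rw [beq_iff_eq, hcnt]; exact h2
    have hkeeplt : keep.Pairwise (· < ·) := by
      rw [hkeep]
      exact List.Pairwise.sublist
        (List.Sublist.map (fun p : Char × Int => p.1)
          (List.filter_sublist (l := pvSpecRLE t) (p := fun p => p.2 == mA)))
        (pv_pairwise_fst_specRLE t hsortedp)
    -- A's posicion vs keep
    have hposnd : (l.foldl (pvStep (some mA) l) []).Nodup :=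
      pv_nodup_foldl _ _ l [] List.nodup_nil
    have hpermAB : keep.Perm (l.foldl (pvStep (some mA) l) []) := by
      rw [List.perm_ext_iff_of_nodup (hkeeplt.imp ne_of_lt) hposnd]
      intro x
      rw [hmemkeep, pv_mem_foldl (some mA) l l [] x]
      simp
    -- letters and digits
    have hletters : PySem.List.sorted ((l.foldl (pvStep (some mA) l) []).filter
        (fun c => PySem.Chars.isalpha c)) (fun x => x) false
        = keep.filter (fun c => PySem.Chars.isalpha c) :=
      PySem.List.sorted_eq_of_perm_of_pairwise_lt _ _ (fun x => x) (hpermAB.filter _) (hkeeplt.filter _)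
    have hdigits : PySem.List.sorted ((l.foldl (pvStep (some mA) l) []).filter
        (fun c => PySem.Chars.isdigit c)) (fun x => x) false
        = keep.filter (fun c => PySem.Chars.isdigit c) :=
      PySem.List.sorted_eq_of_perm_of_pairwise_lt _ _ (fun x => x) (hpermAB.filter _) (hkeeplt.filter _)
    -- assemble
    have hA : pvA_core l = String.ofList
        (PySem.List.sorted ((l.foldl (pvStep (some mA) l) []).filter (fun c => PySem.Chars.isalpha c)) (fun x => x) false
          ++ PySem.List.sorted ((l.foldl (pvStep (some mA) l) []).filter (fun c => PySem.Chars.isdigit c)) (fun x => x) false) := by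
      simp only [pvA_core]
      rw [hloop]
    have hB : pvB_core t = String.ofList
        (keep.filter (fun c => PySem.Chars.isalpha c) ++ keep.filter (fun c => PySem.Chars.isdigit c)) := by
      rw [ht']
      simp only [pvB_core]
      simp only [hruns, hmB]
      rw [← hkeep]
    rw [hA, hB, hletters, hdigits]

-- ===== VERDICT (by name: the statement is the Claim_ definition above) =====
theorem find_characters_spec : Claim_equal_find_characters := by
  intro matrix _
  unfold Spec_find_characters find_characters find_characters_alt
  exact pv_core_eq _
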